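-- pv_equiv track=rewrite | github.com/sschott20/Competitive-Programming | Codeforces Round 887 (Div. 2)/Fibonaccharsis.py | num_fibb
-- ===== SOURCE A (Python) =====
-- def num_fibb(n, k, a1, a2):
--     if a1 < a2:
--         return 0
--     if k == 3 and a1 == 0:
--         return 0
--     if k == 3:
--         return 1
--
--     return num_fibb(a1, k - 1, a2, a1 - a2)
-- ===== SOURCE B (Python) =====
-- def num_fibb(n, k, a1, a2):
--     while True:
--         if a1 < a2:
--             return 0
--         if k == 3 and a1 == 0:
--             return 0
--         if k == 3:
--             return 1
--         n, k, a1, a2 = a1, k - 1, a2, a1 - a2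
-- ===== Notes on version B (the rewrite author's own statement) =====
-- stated objective: simpler
-- what changed: The tail recursion is replaced by an explicit while-True loop that reassigns the state tuple, removing Python's recursion-depth limit and call overhead.
-- outside the precondition, e.g. on num_fibb(0, 950, 0, 0): A returns 0, B returns 0; on num_fibb(0, 2, 0, 0): A raises RecursionError, B does not finish within the time limit
import Mathlib
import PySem

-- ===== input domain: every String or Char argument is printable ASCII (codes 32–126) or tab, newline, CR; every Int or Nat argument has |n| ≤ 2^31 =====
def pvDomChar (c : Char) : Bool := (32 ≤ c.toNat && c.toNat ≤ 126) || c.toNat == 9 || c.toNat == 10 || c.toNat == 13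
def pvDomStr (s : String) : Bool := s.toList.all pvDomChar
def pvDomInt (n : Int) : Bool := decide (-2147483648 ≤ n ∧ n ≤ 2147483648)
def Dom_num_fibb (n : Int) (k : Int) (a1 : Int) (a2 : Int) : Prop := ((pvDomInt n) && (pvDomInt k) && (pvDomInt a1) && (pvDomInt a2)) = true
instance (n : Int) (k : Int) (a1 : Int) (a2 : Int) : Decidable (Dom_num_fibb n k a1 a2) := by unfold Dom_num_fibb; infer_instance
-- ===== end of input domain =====

-- B replaces A's tail recursion by an explicit while-loop over the same state (objective: simpler,
-- no recursion-depth limit); equivalence of the RETURN values is proved for all inputs in Pre_.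

-- ===== PORT A =====
-- A is a tail recursion; on a1 = a2 = 0 with k < 3 it never returns (RecursionError), and for
-- a1 = a2 = 0 with k past the recursion limit it also raises, so the port carries a fuel counter
-- that is provably irrelevant on Pre_ (there the Python recursion terminates within the fuel).
def num_fibbGoA (fuel : Nat) (n : Int) (k : Int) (a1 : Int) (a2 : Int) : Int :=
  match fuel with
  | 0 => 0
  | Nat.succ fuel' =>
    if a1 < a2 then 0
    else if k = 3 ∧ a1 = 0 then 0
    else if k = 3 then 1
    else num_fibbGoA fuel' a1 (k - 1) a2 (a1 - a2)

def num_fibb (n : Int) (k : Int) (a1 : Int) (a2 : Int) : Int :=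
  num_fibbGoA (k.natAbs + a1.natAbs + a2.natAbs + 4) n k a1 a2

-- ===== PORT B =====
-- B's while-True loop: one step of the loop body either returns (Sum.inl) or produces the next
-- state tuple (Sum.inr); the runner iterates the step, with the same fuel bound as A's port.
def num_fibbStep (s : Int × Int × Int × Int) : Sum Int (Int × Int × Int × Int) :=
  match s with
  | (_, k, a1, a2) =>
    if a1 < a2 then Sum.inl 0
    else if k = 3 ∧ a1 = 0 then Sum.inl 0
    else if k = 3 then Sum.inl 1
    else Sum.inr (a1, k - 1, a2, a1 - a2)

def num_fibbLoop (fuel : Nat) (s : Int × Int × Int × Int) : Int :=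
  match fuel with
  | 0 => 0
  | Nat.succ fuel' =>
    match num_fibbStep s with
    | Sum.inl r => r
    | Sum.inr s' => num_fibbLoop fuel' s'

def num_fibb_alt (n : Int) (k : Int) (a1 : Int) (a2 : Int) : Int :=
  num_fibbLoop (k.natAbs + a1.natAbs + a2.natAbs + 4) (n, k, a1, a2)

-- ===== PRECONDITION & SPEC =====
-- Pre_ excludes exactly the inputs on which Python A does not return: with a1 = a2 = 0 the state
-- is stuck at (0,0) so A recurses until k = 3 — forever if k < 3, and past Python's recursion
-- limit (RecursionError) if k is large; the conservative cut at k > 900 also drops a few inputs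
-- (900 < k < recursion limit) where A still returns 0, because the exact raise threshold is
-- environment-dependent.
def Pre_num_fibb (n : Int) (k : Int) (a1 : Int) (a2 : Int) : Prop :=
  ¬ (a1 = 0 ∧ a2 = 0 ∧ (k < 3 ∨ k > 900))
instance (n : Int) (k : Int) (a1 : Int) (a2 : Int) : Decidable (Pre_num_fibb n k a1 a2) := by unfold Pre_num_fibb; infer_instance
def pvWitness_num_fibb : Int × Int × Int × Int := (5, 5, 8, 5)

def Spec_num_fibb (n : Int) (k : Int) (a1 : Int) (a2 : Int) (out : Int) : Prop := out = num_fibb_alt n k a1 a2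
instance (n : Int) (k : Int) (a1 : Int) (a2 : Int) (out : Int) : Decidable (Spec_num_fibb n k a1 a2 out) := by unfold Spec_num_fibb; infer_instance

-- ===== CLAIM (what is proved, stated in full; the proofs are below) =====
def Claim_equal_num_fibb : Prop := ∀ (n : Int) (k : Int) (a1 : Int) (a2 : Int), Dom_num_fibb n k a1 a2 → Pre_num_fibb n k a1 a2 → Spec_num_fibb n k a1 a2 (num_fibb n k a1 a2)

-- ===== LEMMAS AND PROOFS =====
-- The recursion and the loop run through the same states with the same exits, so with the same
-- fuel they agree on every input (Pre_ is only needed for faithfulness to Python, not here).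
theorem goA_eq_loop (fuel : Nat) : ∀ (n k a1 a2 : Int),
    num_fibbGoA fuel n k a1 a2 = num_fibbLoop fuel (n, k, a1, a2) := by
  induction fuel with
  | zero => intro n k a1 a2; rfl
  | succ fuel' ih =>
    intro n k a1 a2
    simp only [num_fibbGoA, num_fibbLoop, num_fibbStep]
    split_ifs <;> simp [ih]

-- ===== VERDICT (by name: the statement is the Claim_ definition above) =====
theorem num_fibb_spec : Claim_equal_num_fibb := by
  intro n k a1 a2 _ _
  unfold Spec_num_fibb num_fibb num_fibb_alt
  exact goA_eq_loop _ n k a1 a2
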